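-- pv_equiv track=rewrite | github.com/lduchosal/xp | src/xp/services/conbus_service.py | _parse_telegrams
-- ===== SOURCE A (Python) =====
-- from typing import List, Optional
--
-- def _parse_telegrams(raw_data: str) -> List[str]:
--     """Parse raw data and extract telegrams using < and > delimiters"""
--     telegrams = []
--     if not raw_data:
--         return telegrams
--
--     # Find all telegram patterns <...>
--     start_pos = 0
--     while True:
--         # Find the start of next telegram
--         start_idx = raw_data.find('<', start_pos)
--         if start_idx == -1:
--             break
--
--         # Find the end of this telegram
--         end_idx = raw_data.find('>', start_idx)
--         if end_idx == -1:
--             # Incomplete telegram at the end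
--             break
--
--         # Extract telegram including < and >
--         telegram = raw_data[start_idx:end_idx + 1]
--         if telegram.strip():
--             telegrams.append(telegram.strip())
--
--         start_pos = end_idx + 1
--
--     return telegrams
-- ===== SOURCE B (Python) =====
-- def _parse_telegrams(raw_data: str):
--     """Single character-level pass with an explicit collecting state."""
--     telegrams = []
--     buf = None  # None = outside a telegram; list of chars when collecting
--     for ch in raw_data:
--         if buf is None:
--             if ch == '<':
--                 buf = ['<']
--         else:
--             buf.append(ch)
--             if ch == '>':
--                 telegrams.append(''.join(buf))
--                 buf = None
--     return telegrams
-- ===== Notes on version B (the rewrite author's own statement) =====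
-- stated objective: alternative
-- what changed: Replaced the find('<')/find('>') index-bookkeeping while-loop by a single character-level pass that carries an explicit collecting buffer and emits a telegram at each closing '>'.
import Mathlib
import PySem

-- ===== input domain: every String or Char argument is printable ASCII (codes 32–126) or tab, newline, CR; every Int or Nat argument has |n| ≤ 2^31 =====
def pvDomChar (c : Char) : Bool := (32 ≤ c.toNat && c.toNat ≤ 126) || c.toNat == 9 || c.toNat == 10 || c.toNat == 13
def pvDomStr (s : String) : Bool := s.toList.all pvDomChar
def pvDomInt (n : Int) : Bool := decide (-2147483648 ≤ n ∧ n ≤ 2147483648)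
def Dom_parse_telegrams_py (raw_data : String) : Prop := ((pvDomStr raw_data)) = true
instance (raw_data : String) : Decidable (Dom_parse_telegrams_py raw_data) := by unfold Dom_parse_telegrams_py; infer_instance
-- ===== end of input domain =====

-- B replaces A's index-bookkeeping find('<')/find('>') while-loop by a single
-- character-level pass with an explicit collecting state (objective: alternative).

-- ===== PORT A =====
-- the while-loop of A: state = (telegrams, start_pos); the fuel argument only makes
-- the recursion total — length+1 iterations always suffice (start_pos strictly increases)
def pvA_loop (s : List Char) (telegrams : List (List Char)) (start_pos : Nat) (fuel : Nat) :
    List (List Char) :=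
  match fuel with
  | 0 => telegrams
  | fuel + 1 =>
    let start_idx := PySem.Chars.findFrom s ['<'] (start_pos : Int)
    if start_idx = -1 then telegrams
    else
      let end_idx := PySem.Chars.findFrom s ['>'] start_idx
      if end_idx = -1 then telegrams
      else
        let telegram := PySem.Chars.slice s (some start_idx) (some (end_idx + 1))
        let telegrams' :=
          if PySem.Chars.strip telegram ≠ [] then telegrams ++ [PySem.Chars.strip telegram]
          else telegrams
        pvA_loop s telegrams' (end_idx.toNat + 1) fuel

def parse_telegrams_py (raw_data : String) : List String :=
  let cs := raw_data.toList
  if cs.isEmpty then []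
  else (pvA_loop cs [] 0 (cs.length + 1)).map String.ofList

-- ===== PORT B =====
-- one step of B's for-loop: buf = none outside a telegram, some b while collecting
def pvB_step (st : List (List Char) × Option (List Char)) (ch : Char) :
    List (List Char) × Option (List Char) :=
  match st with
  | (acc, none) => if ch = '<' then (acc, some ['<']) else (acc, none)
  | (acc, some b) =>
    let b' := b ++ [ch]
    if ch = '>' then (acc ++ [b'], none) else (acc, some b')

def parse_telegrams_py_alt (raw_data : String) : List String :=
  ((raw_data.toList.foldl pvB_step ([], none)).1).map String.ofList

-- ===== PRECONDITION & SPEC =====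
def Spec_parse_telegrams_py (raw_data : String) (out : List String) : Prop := out = parse_telegrams_py_alt raw_data
instance (raw_data : String) (out : List String) : Decidable (Spec_parse_telegrams_py raw_data out) := by unfold Spec_parse_telegrams_py; infer_instance

-- ===== CLAIM (what is proved, stated in full; the proofs are below) =====
def Claim_equal_parse_telegrams_py : Prop := ∀ (raw_data : String), Dom_parse_telegrams_py raw_data → Spec_parse_telegrams_py raw_data (parse_telegrams_py raw_data)

-- ===== LEMMAS AND PROOFS =====

-- B's fold over a list without '<' from the idle state does nothing
lemma foldB_no_lt (l : List Char) (acc : List (List Char)) (h : '<' ∉ l) :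
    List.foldl pvB_step (acc, none) l = (acc, none) := by
  induction l with
  | nil => rfl
  | cons c l ih =>
    simp only [List.mem_cons, not_or] at h
    have hcne : ¬ c = '<' := fun hc => h.1 hc.symm
    simp only [List.foldl_cons, pvB_step, if_neg hcne]
    exact ih h.2

-- B's fold over a list without '>' from a collecting state emits nothing
lemma foldB_no_gt (l : List Char) (acc : List (List Char)) (b : List Char) (h : '>' ∉ l) :
    (List.foldl pvB_step (acc, some b) l).1 = acc := by
  induction l generalizing b with
  | nil => rfl
  | cons c l ih =>
    simp only [List.mem_cons, not_or] at h
    have hcne : ¬ c = '>' := fun hc => h.1 hc.symm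
    simp only [List.foldl_cons, pvB_step, if_neg hcne]
    exact ih _ h.2

-- a prefix without '<' is skipped by B's fold in the idle state
lemma foldB_skip (t l : List Char) (acc : List (List Char)) (h : '<' ∉ t) :
    List.foldl pvB_step (acc, none) (t ++ l) = List.foldl pvB_step (acc, none) l := by
  rw [List.foldl_append, foldB_no_lt t acc h]

-- collecting through a '>'-free middle and the closing '>' emits exactly one telegram
lemma foldB_collect (m r : List Char) (acc : List (List Char)) (b : List Char) (h : '>' ∉ m) :
    List.foldl pvB_step (acc, some b) (m ++ '>' :: r)
      = List.foldl pvB_step (acc ++ [b ++ m ++ ['>']], none) r := by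
  induction m generalizing b with
  | nil => simp [pvB_step]
  | cons c m ih =>
    simp only [List.mem_cons, not_or] at h
    have hcne : ¬ c = '>' := fun hc => h.1 hc.symm
    simp only [List.cons_append, List.foldl_cons, pvB_step, if_neg hcne]
    rw [ih _ h.2]
    simp

-- if no index in [p, q) carries the character c, c is not in that segment of s
lemma not_mem_segment (s : List Char) (c : Char) (p q : Nat) (hq : q ≤ s.length)
    (h : ∀ k, p ≤ k → k < q → ¬ [c] <+: s.drop k) : c ∉ (s.drop p).take (q - p) := by
  intro hc
  obtain ⟨idx, hidx, hval⟩ := List.getElem_of_mem hc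
  have hlen : idx < q - p := lt_of_lt_of_le hidx (by simp)
  have hpq : p + idx < s.length := by omega
  have hv : ((s.drop p).take (q - p))[idx] = s[p + idx] := by
    rw [List.getElem_take, List.getElem_drop]
  refine h (p + idx) (by omega) (by omega) ?_
  have hdrop : s.drop (p + idx) = s[p + idx] :: s.drop (p + idx + 1) :=
    List.drop_eq_getElem_cons hpq
  rw [hdrop, ← hv, hval]
  exact ⟨_, rfl⟩

-- splitting the suffix at a later position
lemma drop_split (s : List Char) (p q : Nat) (hpq : p ≤ q) :
    s.drop p = (s.drop p).take (q - p) ++ s.drop q := by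
  conv_lhs => rw [← List.take_append_drop (q - p) (s.drop p)]
  rw [List.drop_drop]
  congr 2
  omega

-- a found singleton gives a cons decomposition of the suffix
lemma drop_of_prefix (s : List Char) (c : Char) (i : Nat) (hi : i < s.length)
    (h : [c] <+: s.drop i) : s.drop i = c :: s.drop (i + 1) := by
  obtain ⟨t, ht⟩ := h
  have hgc : s.drop i = s[i] :: s.drop (i + 1) := List.drop_eq_getElem_cons hi
  rw [hgc] at ht
  simp only [List.singleton_append] at ht
  injection ht with h1 _
  rw [hgc, ← h1]

-- stripping a telegram ('<' … '>') is the identity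
lemma strip_telegram (m : List Char) :
    PySem.Chars.strip ('<' :: m ++ ['>']) = '<' :: m ++ ['>'] := by
  simp [PySem.Chars.strip, PySem.Chars.lstrip, PySem.Chars.rstrip,
    show PySem.Chars.isspace '<' = false by decide, show PySem.Chars.isspace '>' = false by decide]

-- MAIN INVARIANT: A's loop from position p equals B's fold over the suffix s.drop p
lemma aLoop_eq_foldB (s : List Char) (fuel : Nat) :
    ∀ p (acc : List (List Char)), p ≤ s.length → s.length - p < fuel →
      pvA_loop s acc p fuel = (List.foldl pvB_step (acc, none) (s.drop p)).1 := by
  induction fuel with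
  | zero => intro p acc _ h; omega
  | succ fuel ih =>
    intro p acc hp hfuel
    rw [pvA_loop]
    by_cases h1 : PySem.Chars.findFrom s ['<'] (p : Int) = -1
    · rw [if_pos h1]
      rw [PySem.Chars.findFrom_natCast_eq_neg_one_iff s ['<'] p hp] at h1
      have hmem : '<' ∉ s.drop p := by
        intro hm
        obtain ⟨u, v, huv⟩ := List.append_of_mem hm
        exact h1 ⟨u, v, by simp [huv]⟩
      rw [foldB_no_lt _ _ hmem]
    · rw [if_neg h1]
      obtain ⟨hple, hpre, hmin⟩ := PySem.Chars.findFrom_natCast_spec s ['<'] p hp h1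
      set si := PySem.Chars.findFrom s ['<'] (p : Int) with hsi
      have hsi0 : 0 ≤ si := le_trans (by exact_mod_cast Nat.zero_le p) hple
      have hilen : si.toNat < s.length := by
        by_contra hle
        have hnil : s.drop si.toNat = [] := List.drop_eq_nil_of_le (by omega)
        rw [hnil] at hpre
        exact absurd hpre (by simp)
      have hpi : p ≤ si.toNat := by omega
      have hdropi : s.drop si.toNat = '<' :: s.drop (si.toNat + 1) :=
        drop_of_prefix s '<' si.toNat hilen hpre
      have hT : '<' ∉ (s.drop p).take (si.toNat - p) :=
        not_mem_segment s '<' p si.toNat (le_of_lt hilen) hmin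
      have hsicast : si = ((si.toNat : Nat) : Int) := by omega
      by_cases h2 : PySem.Chars.findFrom s ['>'] si = -1
      · rw [if_pos h2]
        rw [hsicast, PySem.Chars.findFrom_natCast_eq_neg_one_iff s ['>'] si.toNat
          (le_of_lt hilen)] at h2
        have hgt : '>' ∉ s.drop (si.toNat + 1) := by
          intro hm
          obtain ⟨u, v, huv⟩ := List.append_of_mem hm
          exact h2 ⟨'<' :: u, v, by simp [hdropi, huv]⟩
        rw [drop_split s p si.toNat hpi, foldB_skip _ _ _ hT, hdropi, List.foldl_cons]
        have hstep : pvB_step (acc, none) '<' = (acc, some ['<']) := by simp [pvB_step]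
        rw [hstep, foldB_no_gt _ _ _ hgt]
      · rw [if_neg h2]
        have h2' : PySem.Chars.findFrom s ['>'] ((si.toNat : Nat) : Int) ≠ -1 := by
          rw [← hsicast]; exact h2
        obtain ⟨hile, hpre2, hmin2⟩ :=
          PySem.Chars.findFrom_natCast_spec s ['>'] si.toNat (le_of_lt hilen) h2'
        rw [← hsicast] at hile hpre2 hmin2
        set ej := PySem.Chars.findFrom s ['>'] si with hej
        have hej0 : 0 ≤ ej := le_trans (le_trans hsi0 (by omega)) hile
        have hjlen : ej.toNat < s.length := by
          by_contra hle
          have hnil : s.drop ej.toNat = [] := List.drop_eq_nil_of_le (by omega)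
          rw [hnil] at hpre2
          exact absurd hpre2 (by simp)
        have hij : si.toNat ≤ ej.toNat := by omega
        have hdropj : s.drop ej.toNat = '>' :: s.drop (ej.toNat + 1) :=
          drop_of_prefix s '>' ej.toNat hjlen hpre2
        have hij' : si.toNat < ej.toNat := by
          rcases Nat.lt_or_ge si.toNat ej.toNat with h | h
          · exact h
          · exfalso
            have heq : si.toNat = ej.toNat := by omega
            rw [heq, hdropj] at hdropi
            exact absurd (List.head_eq_of_cons_eq hdropi) (by decide)
        set mid := (s.drop (si.toNat + 1)).take (ej.toNat - (si.toNat + 1)) with hmid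
        have hmidgt : '>' ∉ mid :=
          not_mem_segment s '>' (si.toNat + 1) ej.toNat (le_of_lt hjlen)
            (fun k hk1 hk2 => hmin2 k (by omega) hk2)
        have hdropi1 : s.drop (si.toNat + 1) = mid ++ s.drop ej.toNat :=
          drop_split s (si.toNat + 1) ej.toNat (by omega)
        have hdecomp : s.drop si.toNat = ('<' :: mid ++ ['>']) ++ s.drop (ej.toNat + 1) := by
          rw [hdropi, hdropi1, hdropj]; simp
        have hmidlen : mid.length = ej.toNat - (si.toNat + 1) := by
          rw [hmid, List.length_take, List.length_drop]; omega
        have htel : PySem.Chars.slice s (some si) (some (ej + 1))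
            = '<' :: mid ++ ['>'] := by
          have hcast : ej + 1 = (((ej.toNat + 1 : Nat)) : Int) := by omega
          rw [hsicast, hcast]
          show PySem.List.slice s (some ((si.toNat : Nat) : Int))
              (some (((ej.toNat + 1 : Nat) : Nat) : Int)) = _
          rw [PySem.List.slice_natCast]
          rw [hdecomp, List.take_left']
          simp [hmidlen]; omega
        have hstriptel := strip_telegram mid
        simp only [htel, hstriptel]
        split_ifs with hcond
        · rw [ih (ej.toNat + 1) (acc ++ ['<' :: mid ++ ['>']]) (by omega) (by omega)]
          rw [drop_split s p si.toNat hpi, foldB_skip _ _ _ hT, hdropi, List.foldl_cons]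
          have hstep : pvB_step (acc, none) '<' = (acc, some ['<']) := by simp [pvB_step]
          rw [hstep, hdropi1, hdropj, foldB_collect _ _ _ _ hmidgt]
          simp
        · simp at hcond

-- ===== VERDICT (by name: the statement is the Claim_ definition above) =====
theorem parse_telegrams_py_spec : Claim_equal_parse_telegrams_py := by
  intro raw_data _
  show parse_telegrams_py raw_data = parse_telegrams_py_alt raw_data
  unfold parse_telegrams_py parse_telegrams_py_alt
  by_cases h : raw_data.toList.isEmpty
  · simp only [h, if_pos]
    rw [List.isEmpty_iff] at h
    simp [h]
  · simp only [h, if_neg, Bool.false_eq_true, not_false_iff]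
    rw [aLoop_eq_foldB raw_data.toList (raw_data.toList.length + 1) 0 [] (Nat.zero_le _)
      (by omega)]
    simp
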